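-- pv_equiv track=rewrite | github.com/dmoliveira/agents.md | scripts/build_docs_site.py | parse_latest_changelog
-- ===== SOURCE A (Python) =====
-- def parse_latest_changelog(changelog_text: str) -> tuple[str, dict[str, list[str]]]:
--     lines = changelog_text.splitlines()
--     date = ""
--     sections: dict[str, list[str]] = {}
--     current_section = ""
--
--     for line in lines:
--         if line.startswith("## ") and not date:
--             date = line[3:].strip()
--             continue
--         if date and line.startswith("## "):
--             break
--         if not date:
--             continue
--         if line.startswith("### "):
--             current_section = line[4:].strip()
--             sections[current_section] = []
--             continue
--         if current_section and line.startswith("- "):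
--             sections[current_section].append(line[2:].strip())
--
--     if not date:
--         raise ValueError("Latest changelog entry not found")
--     return date, sections
-- ===== SOURCE B (Python) =====
-- def parse_latest_changelog(changelog_text: str) -> tuple[str, dict[str, list[str]]]:
--     lines = changelog_text.splitlines()
--     # find the first '## ' header whose title is nonempty after stripping
--     start = None
--     for i, line in enumerate(lines):
--         if line.startswith("## ") and line[3:].strip():
--             start = i
--             break
--     if start is None:
--         raise ValueError("Latest changelog entry not found")
--     date = lines[start][3:].strip()
--     # body = lines strictly between this header and the next '## ' header
--     body = []
--     for line in lines[start + 1:]: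
--         if line.startswith("## "):
--             break
--         body.append(line)
--     sections: dict[str, list[str]] = {}
--     current = ""
--     for line in body:
--         if line.startswith("### "):
--             current = line[4:].strip()
--             sections[current] = []
--         elif current and line.startswith("- "):
--             sections[current].append(line[2:].strip())
--     return date, sections
-- ===== Notes on version B (the rewrite author's own statement) =====
-- stated objective: simpler
-- what changed: A's single flag-driven loop with break/continue is decomposed into three passes: find the first '## ' header with a nonempty title, slice the body up to the next '## ' header, then parse '### '/'- ' lines of that slice.
import Mathlib
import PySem

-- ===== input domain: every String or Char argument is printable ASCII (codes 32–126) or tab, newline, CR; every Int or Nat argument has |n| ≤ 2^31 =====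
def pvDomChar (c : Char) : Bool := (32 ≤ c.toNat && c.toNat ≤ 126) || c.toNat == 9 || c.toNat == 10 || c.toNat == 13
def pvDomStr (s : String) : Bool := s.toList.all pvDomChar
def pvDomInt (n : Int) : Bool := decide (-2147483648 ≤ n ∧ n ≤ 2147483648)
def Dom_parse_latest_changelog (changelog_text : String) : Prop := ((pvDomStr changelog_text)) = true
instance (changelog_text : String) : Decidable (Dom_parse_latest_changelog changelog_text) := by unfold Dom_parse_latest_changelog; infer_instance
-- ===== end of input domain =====

-- B re-decomposes A's single flag-driven loop into find-header / slice-body / parse-sections passes (objective: simpler structure, same cost).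

-- ===== PORT A =====
-- A's single for-loop over the lines; break is modelled by returning, `not date` is date = "".
def pvALoop : List String → String → PySem.Dict String (List String) → String →
    String × PySem.Dict String (List String)
  | [], date, secs, _ => (date, secs)
  | l :: rest, date, secs, cur =>
    if PySem.Str.startswith l "## " && date == "" then
      pvALoop rest (PySem.Str.strip (PySem.Str.slice l (some 3) none)) secs cur
    else if date != "" && PySem.Str.startswith l "## " then (date, secs)
    else if date == "" then pvALoop rest date secs cur
    else if PySem.Str.startswith l "### " then
      pvALoop rest date
        (secs.insert (PySem.Str.strip (PySem.Str.slice l (some 4) none)) [])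
        (PySem.Str.strip (PySem.Str.slice l (some 4) none))
    else if cur != "" && PySem.Str.startswith l "- " then
      pvALoop rest date
        (secs.modify cur [] (· ++ [PySem.Str.strip (PySem.Str.slice l (some 2) none)])) cur
    else pvALoop rest date secs cur

def parse_latest_changelog (changelog_text : String) : String × (List (String × List String)) :=
  let r := pvALoop (PySem.Str.splitlines changelog_text) "" PySem.Dict.empty ""
  (r.1, r.2.items)  -- when r.1 = "" Python A raises ValueError; those inputs are excluded by Pre_

-- ===== PORT B =====
-- pass 1: first '## ' header with a nonempty stripped title, returning (date, following lines)
def pvBFind : List String → Option (String × List String)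
  | [] => none
  | l :: rest =>
    if PySem.Str.startswith l "## " &&
        PySem.Str.strip (PySem.Str.slice l (some 3) none) != "" then
      some (PySem.Str.strip (PySem.Str.slice l (some 3) none), rest)
    else pvBFind rest

-- pass 2: lines strictly before the next '## ' header
def pvBBody : List String → List String
  | [] => []
  | l :: rest => if PySem.Str.startswith l "## " then [] else l :: pvBBody rest

-- pass 3: parse '### ' / '- ' lines of the body
def pvBSections : List String → String → PySem.Dict String (List String) →
    PySem.Dict String (List String)
  | [], _, secs => secs
  | l :: rest, cur, secs =>
    if PySem.Str.startswith l "### " then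
      pvBSections rest (PySem.Str.strip (PySem.Str.slice l (some 4) none))
        (secs.insert (PySem.Str.strip (PySem.Str.slice l (some 4) none)) [])
    else if cur != "" && PySem.Str.startswith l "- " then
      pvBSections rest cur
        (secs.modify cur [] (· ++ [PySem.Str.strip (PySem.Str.slice l (some 2) none)]))
    else pvBSections rest cur secs

def parse_latest_changelog_alt (changelog_text : String) : String × (List (String × List String)) :=
  match pvBFind (PySem.Str.splitlines changelog_text) with
  | none => ("", [])  -- Python B raises ValueError here; excluded by Pre_
  | some (date, rest) => (date, (pvBSections (pvBBody rest) "" PySem.Dict.empty).items)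

-- ===== PRECONDITION & SPEC =====
-- Pre_ excludes exactly the inputs on which A (and B) raise ValueError:
-- no line starting with '## ' whose remainder strips to a nonempty date.
def Pre_parse_latest_changelog (changelog_text : String) : Prop :=
  (PySem.Str.splitlines changelog_text).any
    (fun l => PySem.Str.startswith l "## " &&
      PySem.Str.strip (PySem.Str.slice l (some 3) none) != "") = true
instance (changelog_text : String) : Decidable (Pre_parse_latest_changelog changelog_text) := by
  unfold Pre_parse_latest_changelog; infer_instance

def pvWitness_parse_latest_changelog : String := "## 2024-01-02\n### Fixed\n- bug one\ntext\n## older"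

def Spec_parse_latest_changelog (changelog_text : String) (out : String × (List (String × List String))) : Prop := out = parse_latest_changelog_alt changelog_text
instance (changelog_text : String) (out : String × (List (String × List String))) : Decidable (Spec_parse_latest_changelog changelog_text out) := by unfold Spec_parse_latest_changelog; infer_instance

-- ===== CLAIM (what is proved, stated in full; the proofs are below) =====
def Claim_equal_parse_latest_changelog : Prop := ∀ (changelog_text : String), Dom_parse_latest_changelog changelog_text → Pre_parse_latest_changelog changelog_text → Spec_parse_latest_changelog changelog_text (parse_latest_changelog changelog_text)

-- ===== LEMMAS AND PROOFS =====

-- Phase 1: while date = "" A only scans for a header; it matches pvBFind.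
theorem pvALoop_find (lines : List String) (secs : PySem.Dict String (List String)) (cur : String) :
    pvALoop lines "" secs cur =
      match pvBFind lines with
      | none => ("", secs)
      | some (d, rest) => pvALoop rest d secs cur := by
  induction lines with
  | nil => simp [pvALoop, pvBFind]
  | cons l rest ih =>
    by_cases hs : PySem.Chars.startswith l.toList ['#', '#', ' '] = true
    · by_cases ht : PySem.Str.strip (PySem.Str.slice l (some 3) none) = ""
      · simp [pvALoop, pvBFind, hs, ht, ih]
      · simp [pvALoop, pvBFind, hs, ht]
    · simp [pvALoop, pvBFind, hs, ih]

-- Phase 2: with date ≠ "", A stops at the next '## ' header and otherwise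
-- runs B's section loop on the body.
theorem pvALoop_sections (rest : List String) (date cur : String)
    (secs : PySem.Dict String (List String)) (hd : date ≠ "") :
    pvALoop rest date secs cur = (date, pvBSections (pvBBody rest) cur secs) := by
  induction rest generalizing cur secs with
  | nil => simp [pvALoop, pvBBody, pvBSections]
  | cons l tl ih =>
    by_cases hs : PySem.Chars.startswith l.toList ['#', '#', ' '] = true
    · simp [pvALoop, pvBBody, pvBSections, hs, hd]
    · by_cases h3 : PySem.Chars.startswith l.toList ['#', '#', '#', ' '] = true
      · simp [pvALoop, pvBBody, pvBSections, hs, h3, hd, ih]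
      · by_cases hc : cur = ""
        · simp [pvALoop, pvBBody, pvBSections, hs, h3, hc, hd, ih]
        · by_cases hi : PySem.Chars.startswith l.toList ['-', ' '] = true
          · simp [pvALoop, pvBBody, pvBSections, hs, h3, hc, hi, hd, ih]
          · simp [pvALoop, pvBBody, pvBSections, hs, h3, hc, hi, hd, ih]

theorem pvBFind_of_any (lines : List String)
    (h : lines.any (fun l => PySem.Str.startswith l "## " &&
      PySem.Str.strip (PySem.Str.slice l (some 3) none) != "") = true) :
    ∃ d rest, pvBFind lines = some (d, rest) ∧ d ≠ "" := by
  induction lines with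
  | nil => simp at h
  | cons l tl ih =>
    by_cases hs : PySem.Chars.startswith l.toList ['#', '#', ' '] = true
    · by_cases ht : PySem.Str.strip (PySem.Str.slice l (some 3) none) = ""
      · simp only [List.any_cons, Bool.or_eq_true] at h
        rcases h with h | h
        · simp [hs, ht] at h
        · obtain ⟨d, rest, hf, hdne⟩ := ih h
          exact ⟨d, rest, by simp [pvBFind, hs, ht, hf], hdne⟩
      · exact ⟨PySem.Str.strip (PySem.Str.slice l (some 3) none), tl,
          by simp [pvBFind, hs, ht], ht⟩
    · simp only [List.any_cons, Bool.or_eq_true] at h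
      rcases h with h | h
      · simp [hs] at h
      · obtain ⟨d, rest, hf, hdne⟩ := ih h
        exact ⟨d, rest, by simp [pvBFind, hs, hf], hdne⟩

-- ===== VERDICT (by name: the statement is the Claim_ definition above) =====
theorem parse_latest_changelog_spec : Claim_equal_parse_latest_changelog := by
  intro s _ hpre
  unfold Spec_parse_latest_changelog parse_latest_changelog parse_latest_changelog_alt
  obtain ⟨d, rest, hf, hd⟩ := pvBFind_of_any _ hpre
  rw [pvALoop_find, hf]
  simp only [pvALoop_sections _ _ _ _ hd]
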